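-- pv_equiv track=rewrite | github.com/zExcel/Wordle-Solver | src/solver.py | construct_frequency_grid
-- ===== SOURCE A (Python) =====
-- def construct_frequency_array(candidate: str) -> list[int]:
-- 	frequency = [0 for i in range(26)]
-- 	for letter in candidate:
-- 		frequency[ord(letter) - ord('a')] += 1
-- 	return frequency
--
-- def construct_frequency_grid(candidates: list[str]) -> list[list[int]]:
-- 	frequency_array = [[0 for i in range(26)] for j in range(len(candidates[0]))]
-- 	for candidate in candidates:
-- 		frequency = construct_frequency_array(candidate)
-- 		for column in range(26):
-- 			for row in range(frequency[column]):
-- 				frequency_array[row][column] += 1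
-- 	return frequency_array
-- ===== SOURCE B (Python) =====
-- def construct_frequency_array(candidate: str) -> list[int]:
-- 	frequency = [0 for i in range(26)]
-- 	for letter in candidate:
-- 		frequency[ord(letter) - ord('a')] += 1
-- 	return frequency
--
-- def construct_frequency_grid(candidates: list[str]) -> list[list[int]]:
-- 	rows = len(candidates[0])
-- 	counts = [construct_frequency_array(candidate) for candidate in candidates]
-- 	return [[sum(1 for f in counts if f[col] > row) for col in range(26)]
-- 	        for row in range(rows)]
-- ===== Notes on version B (the rewrite author's own statement) =====
-- stated objective: alternative
-- what changed: Instead of mutating a grid with a per-candidate triple loop of range increments, B precomputes each candidate's frequency array once and defines every cell directly: grid[row][col] = number of candidates whose count for col exceeds row.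
import Mathlib
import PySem

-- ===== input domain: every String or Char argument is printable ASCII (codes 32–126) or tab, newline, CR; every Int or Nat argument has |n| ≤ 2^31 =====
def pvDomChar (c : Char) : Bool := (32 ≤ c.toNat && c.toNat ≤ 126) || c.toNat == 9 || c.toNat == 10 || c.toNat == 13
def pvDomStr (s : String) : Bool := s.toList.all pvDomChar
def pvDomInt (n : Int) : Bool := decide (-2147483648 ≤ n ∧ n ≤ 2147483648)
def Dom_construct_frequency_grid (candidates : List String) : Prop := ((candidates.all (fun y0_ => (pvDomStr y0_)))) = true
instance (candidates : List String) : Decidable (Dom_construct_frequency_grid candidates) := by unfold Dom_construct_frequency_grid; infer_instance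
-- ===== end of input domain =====

-- B computes each grid cell directly as a count over precomputed frequency arrays,
-- instead of A's in-place range-increment mutation of the grid (objective: alternative).

-- ===== PORT A =====
-- shared helper: both Pythons use the SAME construct_frequency_array
-- (frequency[ord(letter) - ord('a')] += 1, with Python's negative-index wraparound)
def construct_frequency_array (candidate : String) : List Int :=
  candidate.toList.foldl
    (fun frequency letter =>
      PySem.List.pySetD frequency ((letter.toNat : Int) - 97)
        (PySem.List.pyGetD frequency ((letter.toNat : Int) - 97) 0 + 1))
    ((PySem.List.pyRange 0 26).map (fun _ => (0 : Int)))

def construct_frequency_grid (candidates : List String) : List (List Int) :=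
  let frequency_array :=
    (PySem.List.pyRange 0 (PySem.Str.len (PySem.List.pyGetD candidates 0 ""))).map
      (fun _ => (PySem.List.pyRange 0 26).map (fun _ => (0 : Int)))
  candidates.foldl
    (fun grid candidate =>
      let frequency := construct_frequency_array candidate
      (PySem.List.pyRange 0 26).foldl
        (fun grid column =>
          (PySem.List.pyRange 0 (PySem.List.pyGetD frequency column 0)).foldl
            (fun grid row =>
              PySem.List.pySetD grid row
                (PySem.List.pySetD (PySem.List.pyGetD grid row []) column
                  (PySem.List.pyGetD (PySem.List.pyGetD grid row []) column 0 + 1)))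
            grid)
        grid)
    frequency_array

-- ===== PORT B =====
def construct_frequency_grid_alt (candidates : List String) : List (List Int) :=
  let rows := PySem.Str.len (PySem.List.pyGetD candidates 0 "")
  let counts := candidates.map construct_frequency_array
  (PySem.List.pyRange 0 rows).map (fun row =>
    (PySem.List.pyRange 0 26).map (fun col =>
      ((counts.countP (fun f => PySem.List.pyGetD f col 0 > row)) : Int)))

-- ===== PRECONDITION & SPEC =====
-- how many letters of w fall in letter column c (ord-97 with Python's wraparound = (code+33) % 26)
def pvColCount (w : String) (c : Nat) : Nat :=
  w.toList.countP (fun ch => (ch.toNat + 33) % 26 == c)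

-- every character of w is in code range 71..122 (the indices A's helper accepts after wraparound)
def pvGoodChars (w : String) : Bool :=
  w.toList.all (fun ch => 71 ≤ ch.toNat && ch.toNat ≤ 122)

-- every letter-column count of w fits in `rows` grid rows
def pvBounded (w : String) (rows : Nat) : Bool :=
  (List.range 26).all (fun c => pvColCount w c ≤ rows)

-- Pre_ excludes exactly the inputs where A raises IndexError: the empty list (candidates[0]),
-- any character outside codes 71..122 (frequency index out of range even after wraparound),
-- and any candidate with more occurrences of some letter column than len(candidates[0]) rows.
def Pre_construct_frequency_grid (candidates : List String) : Prop :=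
  candidates ≠ [] ∧
  (candidates.all
    (fun w => pvGoodChars w && pvBounded w (candidates.headD "").toList.length)) = true
instance (candidates : List String) : Decidable (Pre_construct_frequency_grid candidates) := by
  unfold Pre_construct_frequency_grid; infer_instance

def pvWitness_construct_frequency_grid : List String := (["ab", "ba"])

def Spec_construct_frequency_grid (candidates : List String) (out : List (List Int)) : Prop := out = construct_frequency_grid_alt candidates
instance (candidates : List String) (out : List (List Int)) : Decidable (Spec_construct_frequency_grid candidates out) := by unfold Spec_construct_frequency_grid; infer_instance

-- ===== CLAIM (what is proved, stated in full; the proofs are below) =====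
def Claim_equal_construct_frequency_grid : Prop := ∀ (candidates : List String), Dom_construct_frequency_grid candidates → Pre_construct_frequency_grid candidates → Spec_construct_frequency_grid candidates (construct_frequency_grid candidates)


-- ===== LEMMAS AND PROOFS =====

-- general helpers
theorem getD_set_lt {α : Type} (g : List α) (i : Nat) (v d : α) (r : Nat) (h : i < g.length) :
    (g.set i v).getD r d = if r = i then v else g.getD r d := by
  by_cases hr : r = i
  · subst hr; simp [List.getD_eq_getElem?_getD, h]
  · simp [List.getD_eq_getElem?_getD, hr, Ne.symm hr]

theorem pySetD_neg {α : Type} (xs : List α) (k : Nat) (v : α) (h0 : 0 < k) (h : k ≤ xs.length) :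
    PySem.List.pySetD xs (-(k : Int)) v = xs.set (xs.length - k) v := by
  have hi : PySem.List.pyIdx? xs.length (-(k : Int)) = some (xs.length - k) := by
    unfold PySem.List.pyIdx?
    rw [if_neg (by omega), if_pos (by omega)]
    simp
  simp [PySem.List.pySetD, PySem.List.pySet?, hi]

theorem set_map_range (n i : Nat) (f : Nat → Int) (v : Int) (_h : i < n) :
    ((List.range n).map f).set i v = (List.range n).map (fun c => if c = i then v else f c) := by
  apply List.ext_getElem
  · simp
  · intro j h1 h2
    simp only [List.getElem_set, List.getElem_map, List.getElem_range]
    simp only [List.length_set, List.length_map, List.length_range] at h1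
    by_cases hj : j = i
    · simp [hj]
    · simp [hj, Ne.symm hj]

-- step characterization
theorem step_eq (freq : List Int) (hlen : freq.length = 26) (ch : Char)
    (h1 : 71 ≤ ch.toNat) (h2 : ch.toNat ≤ 122) :
    PySem.List.pySetD freq ((ch.toNat : Int) - 97)
        (PySem.List.pyGetD freq ((ch.toNat : Int) - 97) 0 + 1)
      = freq.set ((ch.toNat + 33) % 26) (freq.getD ((ch.toNat + 33) % 26) 0 + 1) := by
  by_cases hc : 97 ≤ ch.toNat
  · have hidx : ((ch.toNat : Int) - 97) = ((ch.toNat - 97 : Nat) : Int) := by omega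
    have hcol : (ch.toNat + 33) % 26 = ch.toNat - 97 := by omega
    rw [hidx, hcol, PySem.List.pySetD_natCast, PySem.List.pyGetD_natCast]
  · have hk : 0 < 97 - ch.toNat := by omega
    have hk' : 97 - ch.toNat ≤ freq.length := by omega
    have hidx : ((ch.toNat : Int) - 97) = -((97 - ch.toNat : Nat) : Int) := by omega
    have hcol : (ch.toNat + 33) % 26 = ch.toNat - 71 := by omega
    rw [hidx, pySetD_neg freq _ _ hk hk', PySem.List.pyGetD_neg_natCast freq _ _ hk hk', hcol]
    have he : freq.length - (97 - ch.toNat) = ch.toNat - 71 := by omega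
    have hlt : ch.toNat - 71 < freq.length := by omega
    simp only [he, List.getD_eq_getElem freq 0 hlt]

-- frequency-array fold characterization
theorem freq_foldl (cs : List Char) :
    (∀ ch ∈ cs, 71 ≤ ch.toNat ∧ ch.toNat ≤ 122) → ∀ f : Nat → Int,
    cs.foldl
      (fun frequency letter =>
        PySem.List.pySetD frequency ((letter.toNat : Int) - 97)
          (PySem.List.pyGetD frequency ((letter.toNat : Int) - 97) 0 + 1))
      ((List.range 26).map f)
      = (List.range 26).map
          (fun c => f c + ((cs.countP (fun ch => (ch.toNat + 33) % 26 == c) : Nat) : Int)) := by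
  induction cs with
  | nil => intro _ f; simp
  | cons ch cs ih =>
    intro hgood f
    have hch := hgood ch (by simp)
    have hcol : (ch.toNat + 33) % 26 < 26 := Nat.mod_lt _ (by omega)
    rw [List.foldl_cons,
        step_eq _ (by simp) ch hch.1 hch.2,
        PySem.List.getD_map_range f 26 _ 0 hcol,
        set_map_range 26 _ f _ hcol,
        ih (fun c hc => hgood c (by simp [hc])) _]
    apply List.map_congr_left
    intro c hc
    by_cases h : (ch.toNat + 33) % 26 = c
    · simp [h]; ring
    · simp [h, Ne.symm h]

theorem freq_spec (w : String) (hgood : pvGoodChars w = true) :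
    construct_frequency_array w
      = (List.range 26).map (fun c => ((pvColCount w c : Nat) : Int)) := by
  have h0 : (PySem.List.pyRange 0 26).map (fun _ => (0 : Int))
      = (List.range 26).map (fun _ => (0 : Int)) := by decide
  unfold construct_frequency_array
  rw [h0, freq_foldl w.toList (by simpa [pvGoodChars, List.all_eq_true] using hgood)]
  simp [pvColCount]

-- grid cell access and the grid-increment step
def pvCastRange (n : Nat) : List Int := (List.range n).map (Nat.cast : Nat → Int)

theorem pyRange_castRange (n : Nat) : PySem.List.pyRange 0 ((n : Nat) : Int) = pvCastRange n := by
  rw [PySem.List.pyRange_zero_natCast]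
  unfold pvCastRange
  exact List.map_congr_left (fun k _ => by norm_cast)

theorem pvCastRange_succ (n : Nat) : pvCastRange (n + 1) = pvCastRange n ++ [(n : Int)] := by
  simp [pvCastRange, List.range_succ]

def pvGet (g : List (List Int)) (r c : Nat) : Int := (g.getD r []).getD c 0

def pvIncr (g : List (List Int)) (row col : Int) : List (List Int) :=
  PySem.List.pySetD g row
    (PySem.List.pySetD (PySem.List.pyGetD g row []) col
      (PySem.List.pyGetD (PySem.List.pyGetD g row []) col 0 + 1))

theorem incr_eq (g : List (List Int)) (i c : Nat) :
    pvIncr g (i : Int) (c : Int)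
      = g.set i ((g.getD i []).set c ((g.getD i []).getD c 0 + 1)) := by
  simp [pvIncr]

theorem incr_len (g : List (List Int)) (i c : Nat) :
    (pvIncr g (i : Int) (c : Int)).length = g.length := by
  rw [incr_eq]; simp

theorem getD_mem_of_lt (g : List (List Int)) (i : Nat) (h : i < g.length) :
    g.getD i [] ∈ g := by
  rw [List.getD_eq_getElem g [] h]; exact List.getElem_mem h

theorem incr_rows (g : List (List Int)) (i c : Nat) (hi : i < g.length)
    (hg : ∀ row ∈ g, row.length = 26) :
    ∀ row ∈ pvIncr g (i : Int) (c : Int), row.length = 26 := by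
  rw [incr_eq]
  intro row hrow
  rcases List.mem_or_eq_of_mem_set hrow with h | h
  · exact hg row h
  · rw [h, List.length_set]; exact hg _ (getD_mem_of_lt g i hi)

theorem incr_get (g : List (List Int)) (i c : Nat) (hi : i < g.length) (hc : c < 26)
    (hg : ∀ row ∈ g, row.length = 26) (r c' : Nat) :
    pvGet (pvIncr g (i : Int) (c : Int)) r c'
      = pvGet g r c' + if r = i ∧ c' = c then 1 else 0 := by
  rw [incr_eq]
  unfold pvGet
  rw [getD_set_lt g i _ [] r hi]
  by_cases hr : r = i
  · subst hr
    rw [if_pos rfl, getD_set_lt _ c _ 0 c' (by rw [hg _ (getD_mem_of_lt g r hi)]; exact hc)]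
    by_cases hcc : c' = c
    · subst hcc; simp
    · simp [hcc]
  · simp [hr]

-- the inner `for row in range(frequency[column])` loop
theorem inner_loop (c : Nat) (hc : c < 26) (n : Nat) :
    ∀ (g : List (List Int)), n ≤ g.length → (∀ row ∈ g, row.length = 26) →
    ((pvCastRange n).foldl (fun g row => pvIncr g row (c : Int)) g).length = g.length
    ∧ (∀ row ∈ (pvCastRange n).foldl (fun g row => pvIncr g row (c : Int)) g, row.length = 26)
    ∧ ∀ r c', pvGet ((pvCastRange n).foldl (fun g row => pvIncr g row (c : Int)) g) r c'
        = pvGet g r c' + if r < n ∧ c' = c then 1 else 0 := by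
  induction n with
  | zero => intro g _ hg; refine ⟨rfl, hg, fun r c' => by simp [pvCastRange]⟩
  | succ n ih =>
    intro g hn hg
    rw [pvCastRange_succ, List.foldl_append, List.foldl_cons, List.foldl_nil]
    obtain ⟨ihl, ihr, ihg⟩ := ih g (by omega) hg
    have hlt : n < ((pvCastRange n).foldl (fun g row => pvIncr g row (c : Int)) g).length := by omega
    refine ⟨by rw [incr_len]; omega, incr_rows _ n c hlt ihr, ?_⟩
    intro r c'
    rw [incr_get _ n c hlt hc ihr, ihg]
    split_ifs <;> omega

-- the `for column in range(26)` loop body of A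
def pvColStep (freq : List Int) (g : List (List Int)) (column : Int) : List (List Int) :=
  (PySem.List.pyRange 0 (PySem.List.pyGetD freq column 0)).foldl
    (fun grid row => pvIncr grid row column) g

theorem col_loop (w : String) (hgood : pvGoodChars w = true) :
    ∀ (m : Nat), m ≤ 26 → ∀ g, (∀ c, c < 26 → pvColCount w c ≤ g.length) →
    (∀ row ∈ g, row.length = 26) →
    ((pvCastRange m).foldl (pvColStep (construct_frequency_array w)) g).length = g.length
    ∧ (∀ row ∈ (pvCastRange m).foldl (pvColStep (construct_frequency_array w)) g, row.length = 26)
    ∧ ∀ r c', pvGet ((pvCastRange m).foldl (pvColStep (construct_frequency_array w)) g) r c'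
        = pvGet g r c' + if c' < m ∧ r < pvColCount w c' then 1 else 0 := by
  intro m
  induction m with
  | zero => intro _ g hb hg; refine ⟨rfl, hg, fun r c' => by simp [pvCastRange]⟩
  | succ m ih =>
    intro hm g hb hg
    rw [pvCastRange_succ, List.foldl_append, List.foldl_cons, List.foldl_nil]
    obtain ⟨ihl, ihr, ihg⟩ := ih (by omega) g hb hg
    set g1 := (pvCastRange m).foldl (pvColStep (construct_frequency_array w)) g with hg1
    have hfreq : PySem.List.pyGetD (construct_frequency_array w) ((m : Nat) : Int) 0
        = ((pvColCount w m : Nat) : Int) := by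
      rw [PySem.List.pyGetD_natCast, freq_spec w hgood,
        PySem.List.getD_map_range _ 26 m 0 (by omega)]
    have hcnt : pvColCount w m ≤ g1.length := by rw [ihl]; exact hb m (by omega)
    obtain ⟨l2, r2, g2⟩ := inner_loop m (by omega) (pvColCount w m) g1 hcnt ihr
    have hstep : pvColStep (construct_frequency_array w) g1 ((m : Nat) : Int)
        = (pvCastRange (pvColCount w m)).foldl (fun grid row => pvIncr grid row ((m : Nat) : Int)) g1 := by
      unfold pvColStep
      rw [hfreq, pyRange_castRange]
    rw [hstep]
    refine ⟨by rw [l2, ihl], r2, ?_⟩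
    intro r c'
    rw [g2, ihg]
    by_cases hcm : c' = m
    · subst hcm; split_ifs <;> omega
    · split_ifs <;> omega

theorem pyRange26 : PySem.List.pyRange 0 26 = pvCastRange 26 := by decide

theorem gridA_unfold (candidates : List String) :
    construct_frequency_grid candidates
      = candidates.foldl
          (fun grid candidate =>
            (PySem.List.pyRange 0 26).foldl (pvColStep (construct_frequency_array candidate)) grid)
          ((PySem.List.pyRange 0 (PySem.Str.len (PySem.List.pyGetD candidates 0 ""))).map
            (fun _ => (PySem.List.pyRange 0 26).map (fun _ => (0 : Int)))) := rfl

theorem cand_loop (ws : List String) :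
    ∀ (g : List (List Int)),
    (∀ w ∈ ws, pvGoodChars w = true ∧ ∀ c, c < 26 → pvColCount w c ≤ g.length) →
    (∀ row ∈ g, row.length = 26) →
    (ws.foldl (fun grid candidate =>
        (PySem.List.pyRange 0 26).foldl (pvColStep (construct_frequency_array candidate)) grid) g).length
      = g.length
    ∧ (∀ row ∈ ws.foldl (fun grid candidate =>
        (PySem.List.pyRange 0 26).foldl (pvColStep (construct_frequency_array candidate)) grid) g, row.length = 26)
    ∧ ∀ r c', c' < 26 →
        pvGet (ws.foldl (fun grid candidate =>
          (PySem.List.pyRange 0 26).foldl (pvColStep (construct_frequency_array candidate)) grid) g) r c'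
          = pvGet g r c' + ((ws.countP (fun w => decide (r < pvColCount w c')) : Nat) : Int) := by
  induction ws with
  | nil => intro g _ hg; exact ⟨rfl, hg, fun r c' _ => by simp⟩
  | cons w ws ih =>
    intro g hws hg
    simp only [List.foldl_cons]
    have hw := hws w (by simp)
    obtain ⟨l1, r1, g1⟩ := col_loop w hw.1 26 le_rfl g hw.2 hg
    set gs := (pvCastRange 26).foldl (pvColStep (construct_frequency_array w)) g with hgs
    rw [show (PySem.List.pyRange 0 26).foldl (pvColStep (construct_frequency_array w)) g = gs from by rw [pyRange26]]
    obtain ⟨l2, r2, g2⟩ := ih gs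
      (fun w' hw' => ⟨(hws w' (by simp [hw'])).1,
        fun c hc => by rw [l1]; exact (hws w' (by simp [hw'])).2 c hc⟩) r1
    refine ⟨by rw [l2, l1], r2, ?_⟩
    intro r c' hc'
    rw [g2 r c' hc', g1 r c']
    by_cases hr : r < pvColCount w c'
    · simp [hr, hc']; ring
    · simp [hr, hc']

theorem zero_row_getD (c : Nat) :
    (((PySem.List.pyRange 0 26).map (fun _ => (0 : Int))).getD c 0) = 0 := by
  have h : (PySem.List.pyRange 0 26).map (fun _ => (0 : Int)) = List.replicate 26 0 := by decide
  rw [h, List.getD_eq_getElem?_getD, List.getElem?_replicate]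
  split_ifs <;> simp

theorem grid0_facts (N : Nat) :
    ((pvCastRange N).map (fun _ => (PySem.List.pyRange 0 26).map (fun _ => (0 : Int)))).length = N
    ∧ (∀ row ∈ (pvCastRange N).map (fun _ => (PySem.List.pyRange 0 26).map (fun _ => (0 : Int))),
        row.length = 26)
    ∧ ∀ r c, pvGet ((pvCastRange N).map (fun _ => (PySem.List.pyRange 0 26).map (fun _ => (0 : Int)))) r c = 0 := by
  refine ⟨by simp [pvCastRange], ?_, ?_⟩
  · intro row hrow
    rcases List.mem_map.mp hrow with ⟨_, _, rfl⟩
    decide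
  · intro r c
    unfold pvGet
    by_cases hr : r < ((pvCastRange N).map (fun _ => (PySem.List.pyRange 0 26).map (fun _ => (0 : Int)))).length
    · rw [List.getD_eq_getElem _ [] hr, List.getElem_map]
      exact zero_row_getD c
    · have hnone : (((pvCastRange N).map (fun _ => (PySem.List.pyRange 0 26).map (fun _ => (0 : Int)))).getD r [])
          = ([] : List Int) := by
        rw [List.getD_eq_getElem?_getD, List.getElem?_eq_none (by omega)]
        rfl
      rw [hnone]
      simp

theorem main_assembly (candidates : List String)
    (hne : candidates ≠ [])
    (hall : (candidates.all
      (fun w => pvGoodChars w && pvBounded w (candidates.headD "").toList.length)) = true) :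
    construct_frequency_grid candidates = construct_frequency_grid_alt candidates := by
  obtain ⟨w0, rest, rfl⟩ : ∃ w0 rest, candidates = w0 :: rest := by
    cases candidates with
    | nil => exact absurd rfl hne
    | cons a l => exact ⟨a, l, rfl⟩
  simp only [List.all_eq_true, Bool.and_eq_true] at hall
  have hhead : PySem.List.pyGetD (w0 :: rest) 0 "" = w0 := by
    simp [PySem.List.pyGetD_zero_cons]
  rw [gridA_unfold]
  unfold construct_frequency_grid_alt
  simp only [hhead, PySem.Str.len_eq, pyRange_castRange]
  obtain ⟨hg0len, hg0rows, hg0get⟩ := grid0_facts w0.toList.length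
  have hbound : ∀ w ∈ w0 :: rest, pvGoodChars w = true ∧ ∀ c, c < 26 →
      pvColCount w c ≤ ((pvCastRange w0.toList.length).map
        (fun _ => (PySem.List.pyRange 0 26).map (fun _ => (0 : Int)))).length := by
    intro w hw
    refine ⟨(hall w hw).1, fun c hc => ?_⟩
    have hb := (hall w hw).2
    simp only [pvBounded, List.all_eq_true, List.mem_range, decide_eq_true_eq] at hb
    rw [hg0len]
    exact hb c hc
  obtain ⟨lres, rres, gres⟩ := cand_loop (w0 :: rest) _ hbound hg0rows
  apply List.ext_getElem
  · rw [lres, hg0len]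
    simp [pvCastRange]
  · intro i hi hi2
    have hiN : i < w0.toList.length := by
      simp only [List.length_map, pvCastRange, List.length_range] at hi2
      omega
    have hrowlen := rres _ (List.getElem_mem hi)
    apply List.ext_getElem
    · rw [hrowlen, List.getElem_map, List.length_map]
      rw [pyRange26]
      simp [pvCastRange]
    · intro j hj hj2
      have hj26 : j < 26 := by rwa [hrowlen] at hj
      have hL : (List.foldl (fun grid candidate =>
            List.foldl (pvColStep (construct_frequency_array candidate)) grid (PySem.List.pyRange 0 26))
            ((pvCastRange w0.toList.length).map (fun _ => (PySem.List.pyRange 0 26).map (fun _ => (0 : Int))))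
            (w0 :: rest))[i][j]
          = pvGet (List.foldl (fun grid candidate =>
            List.foldl (pvColStep (construct_frequency_array candidate)) grid (PySem.List.pyRange 0 26))
            ((pvCastRange w0.toList.length).map (fun _ => (PySem.List.pyRange 0 26).map (fun _ => (0 : Int))))
            (w0 :: rest)) i j := by
        unfold pvGet
        rw [List.getD_eq_getElem _ [] hi, List.getD_eq_getElem _ 0 hj]
      rw [hL, gres i j hj26, hg0get, zero_add]
      simp only [List.getElem_map]
      have hcast1 : ∀ (h : i < (pvCastRange w0.toList.length).length),
          (pvCastRange w0.toList.length)[i]'h = ((i : Nat) : Int) := by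
        intro h
        simp [pvCastRange]
      have hcast2 : ∀ (h : j < (PySem.List.pyRange 0 26).length),
          (PySem.List.pyRange 0 26)[j]'h = ((j : Nat) : Int) := by
        intro h
        have h? : (PySem.List.pyRange 0 26)[j]? = some ((j : Nat) : Int) := by
          rw [pyRange26]
          simp [pvCastRange, hj26]
        rw [List.getElem?_eq_getElem h] at h?
        exact Option.some.inj h?
      simp only [hcast1, hcast2]
      rw [List.countP_map]
      congr 1
      apply List.countP_congr
      intro w hw
      have hgood := (hbound w hw).1
      simp only [Function.comp_apply]
      rw [freq_spec w hgood, PySem.List.pyGetD_natCast,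
        PySem.List.getD_map_range _ 26 j 0 hj26]
      simp [Nat.cast_lt]

-- ===== VERDICT (by name: the statement is the Claim_ definition above) =====
theorem construct_frequency_grid_spec : Claim_equal_construct_frequency_grid := by
  intro candidates _ hpre
  unfold Spec_construct_frequency_grid
  exact main_assembly candidates hpre.1 hpre.2
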